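-- pv_equiv track=rewrite | github.com/Novartis/yap | bin/yap_comparison.py | find_duplicates_in_group
-- ===== SOURCE A (Python) =====
-- def find_duplicates_in_group(group):
--     '''
--     Given a group as a list,
--     Returns a dictionary containing duplicate names and their count,
--     Return empty dict if no duplicates found
--     '''
--     if len(group) <= 0:
--         return {}  # empty o/p for empty i/p
--     duplicates = {}  # output dictionary to store duplicates
--     names_table = {}  # instantiate a names table to keep track of all
--     # items in current group
--     for set in group:  # each set can contain multiple names/files
--         for name in set:
--             if name in names_table:
--                 names_table[name] = names_table[name] + 1
--                 # add repetition count
--                 duplicates[name] = names_table[name]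
--             else:
--                 names_table[name] = 1  # add first occurrence of a name
--     return duplicates  # return o/p
-- ===== SOURCE B (Python) =====
-- def find_duplicates_in_group(group):
--     # Two-pass reformulation: flatten once, tally all names, then emit each
--     # duplicate exactly once (at its second occurrence) with its final count.
--     names = [name for s in group for name in s]
--     counts = {}
--     for name in names:
--         counts[name] = counts.get(name, 0) + 1
--     duplicates = {}
--     seen = set()
--     for name in names:
--         if name in seen and name not in duplicates:
--             duplicates[name] = counts[name]
--         seen.add(name)
--     return duplicates
-- ===== Notes on version B (the rewrite author's own statement) =====
-- stated objective: alternative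
-- what changed: A interleaves two dicts in one nested loop, repeatedly overwriting each duplicate's entry at every repetition; B flattens the group, computes the complete tally in one pass, then in a separate pass inserts each duplicate exactly once (at its second occurrence) with its final count.
import Mathlib
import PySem

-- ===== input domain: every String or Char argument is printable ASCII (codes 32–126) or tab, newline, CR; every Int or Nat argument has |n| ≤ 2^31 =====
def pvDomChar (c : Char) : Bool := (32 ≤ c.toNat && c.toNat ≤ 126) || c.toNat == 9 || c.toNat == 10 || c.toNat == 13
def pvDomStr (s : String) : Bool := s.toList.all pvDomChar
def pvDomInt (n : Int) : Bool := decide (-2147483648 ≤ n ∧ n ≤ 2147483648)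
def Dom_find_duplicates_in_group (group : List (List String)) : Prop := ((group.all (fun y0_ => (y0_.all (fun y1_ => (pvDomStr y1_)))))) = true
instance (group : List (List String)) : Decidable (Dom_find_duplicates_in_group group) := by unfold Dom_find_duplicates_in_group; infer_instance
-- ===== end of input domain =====

-- B interleaves nothing: it flattens the group, tallies every name in one pass, then
-- inserts each duplicate once (at its second occurrence) with its final count.
-- A instead maintains two dicts in one nested loop, overwriting at every repetition.

-- ===== PORT A =====
-- loop body of A's inner 'for name in set' (duplicates, names_table)
def astep_fdg (st : PySem.Dict String Int × PySem.Dict String Int) (name : String) :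
    PySem.Dict String Int × PySem.Dict String Int :=
  if st.2.contains name then
    let c := st.2.getD name 0 + 1
    (st.1.insert name c, st.2.insert name c)
  else
    (st.1, st.2.insert name 1)

def find_duplicates_in_group (group : List (List String)) : List (String × Int) :=
  if group.length ≤ 0 then
    []
  else
    ((group.foldl (fun st s => s.foldl astep_fdg st)
        (PySem.Dict.empty, PySem.Dict.empty)).1).items

-- ===== PORT B =====
-- loop body of B's second pass (duplicates, seen)
def bstep_fdg (counts : PySem.Dict String Int)
    (st : PySem.Dict String Int × PySem.Set String) (name : String) :
    PySem.Dict String Int × PySem.Set String :=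
  (if st.2.contains name && !st.1.contains name then st.1.insert name (counts.getD name 0)
   else st.1,
   st.2.add name)

def find_duplicates_in_group_alt (group : List (List String)) : List (String × Int) :=
  let names := group.flatMap (fun s => s)
  let counts := names.foldl
    (fun (d : PySem.Dict String Int) name => d.insert name (d.getD name 0 + 1))
    PySem.Dict.empty
  ((names.foldl (bstep_fdg counts) (PySem.Dict.empty, PySem.Set.ofList [])).1).items

-- ===== PRECONDITION & SPEC =====
def Spec_find_duplicates_in_group (group : List (List String)) (out : List (String × Int)) : Prop := out = find_duplicates_in_group_alt group
instance (group : List (List String)) (out : List (String × Int)) : Decidable (Spec_find_duplicates_in_group group out) := by unfold Spec_find_duplicates_in_group; infer_instance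

-- ===== CLAIM (what is proved, stated in full; the proofs are below) =====
def Claim_equal_find_duplicates_in_group : Prop := ∀ (group : List (List String)), Dom_find_duplicates_in_group group → Spec_find_duplicates_in_group group (find_duplicates_in_group group)

-- ===== LEMMAS AND PROOFS =====

-- The keys that end up in the duplicates dict, in insertion order:
-- given already-seen set s and already-emitted keys k, walking the stream.
def gdup_fdg (s : PySem.Set String) (k : List String) : List String → List String
  | [] => []
  | n :: l =>
    if s.contains n && !(k.contains n) then n :: gdup_fdg (s.add n) (k ++ [n]) l
    else gdup_fdg (s.add n) k l

def Gd_fdg (l : List String) : List String := gdup_fdg (PySem.Set.ofList []) [] l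

lemma set_ofList_contains (l : List String) (x : String) :
    (PySem.Set.ofList l).contains x = l.contains x := by
  simp [PySem.Set.contains_eq_listContains, List.contains_eq_mem, PySem.Set.mem_ofList]

lemma and_split_fdg {a b : Bool} (h : (a && b) = true) : a = true ∧ b = true := by
  simp_all

lemma bchar_fdg (c : PySem.Dict String Int) :
    ∀ (l : List String) (d : PySem.Dict String Int) (s : PySem.Set String),
      (l.foldl (bstep_fdg c) (d, s)).1.items
        = d.items ++ (gdup_fdg s d.keys l).map (fun n => (n, c.getD n 0)) := by
  intro l
  induction l with
  | nil => intro d s; simp [gdup_fdg]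
  | cons n l ih =>
    intro d s
    have hk : d.keys.contains n = d.contains n := by
      simp [List.contains_eq_mem, PySem.Dict.contains_eq_decide_mem_keys]
    simp only [List.foldl_cons, bstep_fdg, gdup_fdg, hk]
    split_ifs with hc
    · have hdn : d.contains n = false := by revert hc; cases d.contains n <;> simp
      rw [ih _ _, PySem.Dict.items_insert_of_not_contains d _ hdn,
        PySem.Dict.keys_insert_of_not_contains d _ hdn]
      simp
    · exact ih d (s.add n)

lemma gdup_append_fdg :
    ∀ (l₁ l₂ : List String) (s : PySem.Set String) (k : List String),
      gdup_fdg s k (l₁ ++ l₂)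
        = gdup_fdg s k l₁ ++ gdup_fdg (s.update l₁) (k ++ gdup_fdg s k l₁) l₂ := by
  intro l₁
  induction l₁ with
  | nil => intro l₂ s k; simp [gdup_fdg, PySem.Set.update_nil]
  | cons n l₁ ih =>
    intro l₂ s k
    simp only [List.cons_append, gdup_fdg, PySem.Set.update_cons]
    split_ifs with hc
    · rw [ih]; simp
    · rw [ih]

lemma Gd_append_singleton (l : List String) (x : String) :
    Gd_fdg (l ++ [x])
      = if l.contains x && !(Gd_fdg l).contains x then Gd_fdg l ++ [x] else Gd_fdg l := by
  unfold Gd_fdg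
  rw [gdup_append_fdg]
  have hupd : (PySem.Set.ofList ([] : List String)).update l = PySem.Set.ofList l := by
    rw [PySem.Set.ofList_nil, PySem.Set.update_nil_left]
  have hcond : (PySem.Set.ofList l).contains x = l.contains x := set_ofList_contains l x
  simp only [hupd, List.nil_append, gdup_fdg, hcond]
  split_ifs with h <;> simp

lemma mem_Gd_fdg : ∀ (l : List String) (x : String), x ∈ Gd_fdg l ↔ 2 ≤ l.count x := by
  intro l
  induction l using List.reverseRecOn with
  | nil => intro x; simp [Gd_fdg, gdup_fdg]
  | append_singleton l y ih =>
    intro x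
    rw [Gd_append_singleton]
    have hcnt : (l ++ [y]).count x = l.count x + (if x = y then 1 else 0) := by
      by_cases h : x = y
      · subst h; simp [List.count_append, List.count_cons, List.count_nil]
      · have h' : ¬ y = x := fun e => h e.symm
        simp [List.count_append, List.count_cons, h, h']
    by_cases hb : (l.contains y && !(Gd_fdg l).contains y) = true
    · rw [if_pos hb]
      obtain ⟨hb1, hb2⟩ := and_split_fdg hb
      have hyl : y ∈ l := by simpa [List.contains_eq_mem] using hb1
      have hyg : y ∉ Gd_fdg l := by
        have h2 : (Gd_fdg l).contains y = false := by
          revert hb2; cases (Gd_fdg l).contains y <;> simp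
        simpa [List.contains_eq_mem] using h2
      have hy1 : l.count y = 1 := by
        have c1 : 1 ≤ l.count y := List.one_le_count_iff.mpr hyl
        have c2 : ¬ 2 ≤ l.count y := fun h => hyg ((ih y).mpr h)
        omega
      rw [List.mem_append, hcnt]
      by_cases hxy : x = y
      · subst hxy
        constructor
        · intro _; simp [hy1]
        · intro _; simp
      · rw [if_neg hxy, Nat.add_zero]
        constructor
        · rintro (h | h)
          · exact (ih x).mp h
          · simp at h; exact absurd h hxy
        · intro h; exact Or.inl ((ih x).mpr h)
    · rw [if_neg hb, hcnt]
      by_cases hxy : x = y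
      · subst hxy
        by_cases hyl : x ∈ l
        · have hyg : x ∈ Gd_fdg l := by
            by_contra hng
            apply hb
            have hb1 : l.contains x = true := by simpa [List.contains_eq_mem] using hyl
            have hb2 : (Gd_fdg l).contains x = false := by
              simpa [List.contains_eq_mem] using hng
            rw [hb1, hb2]; rfl
          have hc2 := (ih x).mp hyg
          constructor
          · intro _; rw [if_pos rfl]; omega
          · intro _; exact hyg
        · have h0 : l.count x = 0 := List.count_eq_zero.mpr hyl
          have hyg : x ∉ Gd_fdg l := fun h => by
            have := (ih x).mp h; omega
          constructor
          · intro h; exact absurd h hyg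
          · intro h; rw [if_pos rfl, h0] at h; omega
      · have hx0 : (if x = y then 1 else 0) = 0 := by simp [hxy]
        rw [hx0]
        rw [Nat.add_zero]
        exact ih x

lemma snd_afold_fdg : ∀ (l : List String) (st : PySem.Dict String Int × PySem.Dict String Int),
    (l.foldl astep_fdg st).2
      = l.foldl (fun d n => d.insert n (d.getD n 0 + 1)) st.2 := by
  intro l
  induction l with
  | nil => intro st; rfl
  | cons n l ih =>
    intro st
    by_cases hc : st.2.contains n = true
    · simp only [List.foldl_cons, astep_fdg, hc, if_pos]
      exact ih _
    · have hc' : st.2.contains n = false := by simpa using hc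
      have h0 : st.2.getD n 0 = 0 := PySem.Dict.getD_of_not_contains st.2 0 hc'
      simp only [List.foldl_cons, astep_fdg, hc', Bool.false_eq_true, if_neg, h0]
      rw [ih]
      norm_num

lemma achar_fdg : ∀ (l : List String),
    (l.foldl astep_fdg (PySem.Dict.empty, PySem.Dict.empty)).1.items
      = (Gd_fdg l).map (fun n => (n, (l.count n : Int))) := by
  intro l
  induction l using List.reverseRecOn with
  | nil => simp [Gd_fdg, gdup_fdg, PySem.Dict.empty]
  | append_singleton l x ih =>
    rw [List.foldl_append]
    have htbl : (l.foldl astep_fdg (PySem.Dict.empty, PySem.Dict.empty)).2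
        = PySem.Dict.counter l := by
      rw [snd_afold_fdg]
      exact PySem.Dict.foldl_insert_getD_add_one_eq_counter l
    set P := l.foldl astep_fdg (PySem.Dict.empty, PySem.Dict.empty) with hP
    have hkeys : P.1.keys = Gd_fdg l := by
      show P.1.items.map Prod.fst = _
      rw [ih, List.map_map]
      exact List.map_id _
    have hPcont : ∀ z, P.1.contains z = (Gd_fdg l).contains z := by
      intro z
      rw [PySem.Dict.contains_eq_decide_mem_keys, hkeys, List.contains_eq_mem]
    by_cases hxl : x ∈ l
    · have hcontc : (PySem.Dict.counter l).contains x = true := by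
        rw [PySem.Dict.contains_counter]
        simpa [List.contains_eq_mem] using hxl
      have hgd : (PySem.Dict.counter l).getD x 0 = (l.count x : Int) :=
        PySem.Dict.getD_counter l x
      simp only [List.foldl_cons, List.foldl_nil, astep_fdg, htbl, hcontc, if_pos, hgd]
      by_cases h2 : 2 ≤ l.count x
      · have hxg : x ∈ Gd_fdg l := (mem_Gd_fdg l x).mpr h2
        have hGd : Gd_fdg (l ++ [x]) = Gd_fdg l := by
          rw [Gd_append_singleton]
          have : (l.contains x && !(Gd_fdg l).contains x) = false := by
            simp [List.contains_eq_mem, hxg]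
          rw [this]; simp
        have hcont : P.1.contains x = true := by
          rw [hPcont]; simpa [List.contains_eq_mem] using hxg
        rw [PySem.Dict.items_insert_of_contains P.1 _ hcont, ih, List.map_map, hGd]
        apply List.map_congr_left
        intro n hn
        by_cases hnx : n = x
        · subst hnx
          simp [List.count_append, List.count_singleton]
        · have : (n == x) = false := by simpa using hnx
          simp [Function.comp, this, List.count_append, List.count_singleton,
            Ne.symm hnx, hnx]
      · have hxg : x ∉ Gd_fdg l := fun h => h2 ((mem_Gd_fdg l x).mp h)
        have hGd : Gd_fdg (l ++ [x]) = Gd_fdg l ++ [x] := by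
          rw [Gd_append_singleton]
          have : (l.contains x && !(Gd_fdg l).contains x) = true := by
            simp [List.contains_eq_mem, hxl, hxg]
          rw [this]; simp
        have hcont : P.1.contains x = false := by
          rw [hPcont]; simpa [List.contains_eq_mem] using hxg
        rw [PySem.Dict.items_insert_of_not_contains P.1 _ hcont, ih, hGd, List.map_append]
        congr 1
        · apply List.map_congr_left
          intro n hn
          have hnx : n ≠ x := fun h => hxg (h ▸ hn)
          simp [List.count_append, Ne.symm hnx]
        · simp [List.count_append, List.count_singleton]
    · have hcontc : (PySem.Dict.counter l).contains x = false := by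
        rw [PySem.Dict.contains_counter]
        simpa [List.contains_eq_mem] using hxl
      simp only [List.foldl_cons, List.foldl_nil, astep_fdg, htbl, hcontc,
        Bool.false_eq_true, if_false]
      have hGd : Gd_fdg (l ++ [x]) = Gd_fdg l := by
        rw [Gd_append_singleton]
        have : (l.contains x && !(Gd_fdg l).contains x) = false := by
          simp [List.contains_eq_mem, hxl]
        rw [this]; simp
      rw [ih, hGd]
      apply List.map_congr_left
      intro n hn
      have hnl : n ∈ l := by
        have := (mem_Gd_fdg l n).mp hn
        exact List.one_le_count_iff.mp (by omega)
      have hnx : n ≠ x := fun h => hxl (h ▸ hnl)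
      simp [List.count_append, Ne.symm hnx]

-- ===== VERDICT (by name: the statement is the Claim_ definition above) =====
theorem find_duplicates_in_group_spec : Claim_equal_find_duplicates_in_group := by
  intro group _
  unfold Spec_find_duplicates_in_group
  have hB : find_duplicates_in_group_alt group
      = (Gd_fdg group.flatten).map (fun n => (n, (group.flatten.count n : Int))) := by
    unfold find_duplicates_in_group_alt
    show ((group.flatMap (fun s => s)).foldl
        (bstep_fdg ((group.flatMap (fun s => s)).foldl
          (fun d name => d.insert name (d.getD name 0 + 1)) PySem.Dict.empty))
        (PySem.Dict.empty, PySem.Set.ofList [])).1.items = _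
    have hflat : group.flatMap (fun s => s) = group.flatten := by
      simp [List.flatMap_def]
    rw [hflat, PySem.Dict.foldl_insert_getD_add_one_eq_counter, bchar_fdg]
    have hkeys : (PySem.Dict.empty : PySem.Dict String Int).keys = [] := rfl
    have hitems : (PySem.Dict.empty : PySem.Dict String Int).items = [] := rfl
    rw [hkeys, hitems, List.nil_append]
    show (Gd_fdg group.flatten).map _ = _
    apply List.map_congr_left
    intro n hn
    rw [PySem.Dict.getD_counter]
  rw [hB]
  unfold find_duplicates_in_group
  by_cases hg : group.length ≤ 0
  · have hnil : group = [] := List.length_eq_zero_iff.mp (Nat.le_zero.mp hg)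
    subst hnil
    rfl
  · rw [if_neg hg]
    have hnest : group.foldl (fun st s => s.foldl astep_fdg st)
        (PySem.Dict.empty, PySem.Dict.empty)
        = (group.flatten).foldl astep_fdg (PySem.Dict.empty, PySem.Dict.empty) := by
      rw [List.foldl_flatten]
    rw [hnest, achar_fdg]
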